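-- pv_equiv track=rewrite | github.com/juyeongeun/python_CodingTest | 프로그래머스/2/42577. 전화번호 목록/전화번호 목록.py | solution
-- ===== SOURCE A (Python) =====
-- def solution(phone_book):
--     phone_dict = {}
--
--     for number in phone_book:
--         phone_dict[number] = True
--
--     for number in phone_book:
--         temp = ""
--         for digit in number[:-1]:
--             temp += digit
--             if temp in phone_dict:
--                 return False
--
--     return True
-- ===== SOURCE B (Python) =====
-- def solution(phone_book):
--     # a number p "has" another number as prefix exactly when some NONEMPTY proper
--     # prefix of an entry is itself an entry
--     book = sorted(phone_book)
--     for a, b in zip(book, book[1:]):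
--         if a and len(a) < len(b) and b.startswith(a):
--             return False
--     return True
-- ===== Notes on version B (the rewrite author's own statement) =====
-- stated objective: alternative
-- what changed: Replaces the hash-set plus per-number character-by-character prefix enumeration with a lexicographic sort followed by a single adjacent-pair nonempty-proper-prefix scan.
import Mathlib
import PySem

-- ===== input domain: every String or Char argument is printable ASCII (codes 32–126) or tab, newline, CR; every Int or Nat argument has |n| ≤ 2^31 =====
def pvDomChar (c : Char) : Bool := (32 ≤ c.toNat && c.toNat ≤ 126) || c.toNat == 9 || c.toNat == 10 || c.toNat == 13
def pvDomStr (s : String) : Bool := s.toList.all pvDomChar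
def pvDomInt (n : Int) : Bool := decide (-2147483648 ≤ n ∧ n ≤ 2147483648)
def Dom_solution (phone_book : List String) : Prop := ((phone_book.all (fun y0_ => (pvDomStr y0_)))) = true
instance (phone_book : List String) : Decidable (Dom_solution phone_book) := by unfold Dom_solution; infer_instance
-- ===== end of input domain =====

-- B replaces A's hash-set plus per-number character-by-character prefix enumeration with a
-- lexicographic sort followed by a single adjacent-pair nonempty-proper-prefix scan
-- (an alternative algorithm of similar measured cost).

-- ===== PORT A =====
-- phone_dict = {}; for number in phone_book: phone_dict[number] = True
def pvDict (phone_book : List String) : PySem.Dict String Bool :=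
  phone_book.foldl (fun d number => d.insert number true) PySem.Dict.empty

-- for digit in number[:-1]: temp += digit; if temp in phone_dict: return False
-- temp is carried as its character list; 'temp in phone_dict' tests the string String.ofList temp (exact)
def pvInner (d : PySem.Dict String Bool) (temp : List Char) (digits : List Char) : Bool :=
  match digits with
  | [] => false
  | c :: rest =>
      let temp' := temp ++ [c]
      if d.contains (String.ofList temp') then true else pvInner d temp' rest

-- for number in phone_book: … (early return False) … ; return True
def pvOuter (d : PySem.Dict String Bool) (numbers : List String) : Bool :=
  match numbers with
  | [] => true
  | number :: rest =>
      if pvInner d [] (PySem.Str.slice number none (some (-1))).toList then false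
      else pvOuter d rest

def solution (phone_book : List String) : Bool :=
  pvOuter (pvDict phone_book) phone_book

-- ===== PORT B =====
-- book = sorted(phone_book); for a, b in zip(book, book[1:]):
--   if a and len(a) < len(b) and b.startswith(a): return False
-- return True   ('a' is Python string truthiness: a ≠ "")
def solution_alt (phone_book : List String) : Bool :=
  let book := PySem.List.sorted phone_book (fun x => x) false
  !((book.zip (PySem.List.slice book (some 1) none)).any (fun ab =>
      !(ab.1 == "") && (decide (PySem.Str.len ab.1 < PySem.Str.len ab.2) &&
        PySem.Str.startswith ab.2 ab.1)))

-- ===== PRECONDITION & SPEC =====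
def Spec_solution (phone_book : List String) (out : Bool) : Prop := out = solution_alt phone_book
instance (phone_book : List String) (out : Bool) : Decidable (Spec_solution phone_book out) := by unfold Spec_solution; infer_instance

-- ===== CLAIM (what is proved, stated in full; the proofs are below) =====
def Claim_equal_solution : Prop := ∀ (phone_book : List String), Dom_solution phone_book → Spec_solution phone_book (solution phone_book)

-- ===== LEMMAS AND PROOFS =====

-- "some nonempty proper prefix of an entry is itself an entry" — the condition both programs detect
def pvBad (book : List String) : Prop :=
  ∃ p s, p ∈ book ∧ s ∈ book ∧ p.toList ≠ [] ∧ p.toList <+: s.toList ∧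
    p.toList.length < s.toList.length

-- ---- A-side characterisation ----

theorem pvDict_contains (book : List String) (x : String) :
    (pvDict book).contains x = true ↔ x ∈ book := by
  rw [PySem.Dict.contains_iff_mem_keys]
  show x ∈ (List.foldl (fun d number => d.insert number ((fun _ _ => true) d number)) PySem.Dict.empty book).keys ↔ _
  rw [PySem.Dict.keys_foldl_insert]
  have hk : (PySem.Dict.empty : PySem.Dict String Bool).keys = [] := rfl
  rw [hk, PySem.Set.mem_update]
  simp

theorem pvInner_iff (d : PySem.Dict String Bool) (digits : List Char) :
    ∀ temp, (pvInner d temp digits = true ↔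
      ∃ k : Nat, 0 < k ∧ k ≤ digits.length ∧
        d.contains (String.ofList (temp ++ digits.take k)) = true) := by
  induction digits with
  | nil =>
      intro temp
      simp only [pvInner, List.length_nil]
      constructor
      · intro h; cases h
      · rintro ⟨k, hk, hle, -⟩; omega
  | cons c rest ih =>
      intro temp
      simp only [pvInner]
      split_ifs with h
      · constructor
        · intro _
          exact ⟨1, Nat.one_pos, by simp, by simpa using h⟩
        · intro _; rfl
      · rw [ih (temp ++ [c])]
        constructor
        · rintro ⟨k, hk, hle, hc⟩
          refine ⟨k + 1, Nat.succ_pos _, by simp; omega, ?_⟩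
          simpa [List.take_succ_cons, List.append_assoc] using hc
        · rintro ⟨k, hk, hle, hc⟩
          match k, hk with
          | 1, _ =>
              exfalso
              rw [show ((c :: rest).take 1) = [c] by simp] at hc
              exact h hc
          | (k' + 2), _ =>
              refine ⟨k' + 1, Nat.succ_pos _, by simp at hle ⊢; omega, ?_⟩
              simpa [List.take_succ_cons, List.append_assoc] using hc
      
theorem pvOuter_false_iff (d : PySem.Dict String Bool) (numbers : List String) :
    pvOuter d numbers = false ↔
      ∃ n ∈ numbers, pvInner d [] (PySem.Str.slice n none (some (-1))).toList = true := by
  induction numbers with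
  | nil => simp [pvOuter]
  | cons n rest ih =>
      simp only [pvOuter]
      split_ifs with h
      · exact iff_of_true rfl ⟨n, List.mem_cons_self, h⟩
      · rw [ih]
        constructor
        · rintro ⟨m, hm, hi⟩; exact ⟨m, List.mem_cons_of_mem _ hm, hi⟩
        · rintro ⟨m, hm, hi⟩
          rcases List.mem_cons.mp hm with rfl | hm'
          · exact absurd hi h
          · exact ⟨m, hm', hi⟩

theorem solution_false_iff (book : List String) :
    solution book = false ↔ pvBad book := by
  unfold solution
  rw [pvOuter_false_iff]
  constructor
  · rintro ⟨n, hn, hi⟩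
    rw [pvInner_iff] at hi
    obtain ⟨k, hk, hle, hc⟩ := hi
    rw [PySem.Str.slice_to_neg_one] at hle hc
    have hlen : n.toList.dropLast.length = n.toList.length - 1 := List.length_dropLast
    have htk : n.toList.dropLast.take k = n.toList.take k := by
      rw [List.dropLast_eq_take, List.take_take, Nat.min_eq_left (by omega)]
    rw [List.nil_append, htk] at hc
    refine ⟨String.ofList (n.toList.take k), n, (pvDict_contains book _).mp hc, hn, ?_, ?_, ?_⟩
    · rw [String.toList_ofList]
      intro hnil
      have := congrArg List.length hnil
      simp only [List.length_take, List.length_nil] at this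
      omega
    · rw [String.toList_ofList]; exact List.take_prefix _ _
    · rw [String.toList_ofList]
      simp only [List.length_take]
      omega
  · rintro ⟨p, s, hp, hs, hne, hpre, hlt⟩
    refine ⟨s, hs, ?_⟩
    rw [pvInner_iff]
    have hplen : 0 < p.toList.length := List.length_pos_iff.mpr hne
    refine ⟨p.toList.length, hplen, ?_, ?_⟩
    · rw [PySem.Str.slice_to_neg_one, List.length_dropLast]; omega
    · have htk : s.toList.take p.toList.length = p.toList :=
        (List.prefix_iff_eq_take.mp hpre).symm
      rw [PySem.Str.slice_to_neg_one, List.nil_append, List.dropLast_eq_take,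
        List.take_take, Nat.min_eq_left (by omega), htk, String.ofList_toList]
      exact (pvDict_contains book p).mpr hp

-- ---- B-side characterisation ----

theorem pvAlt_false_iff (book : List String) :
    solution_alt book = false ↔
      ∃ ab ∈ (PySem.List.sorted book (fun x => x) false).zip
              (PySem.List.sorted book (fun x => x) false).tail,
        ab.1 ≠ "" ∧ ab.1.toList <+: ab.2.toList ∧
          ab.1.toList.length < ab.2.toList.length := by
  show (!(((PySem.List.sorted book (fun x => x) false).zip
      (PySem.List.slice (PySem.List.sorted book (fun x => x) false) (some 1) none)).any
      (fun ab => !(ab.1 == "") && (decide (PySem.Str.len ab.1 < PySem.Str.len ab.2) &&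
        PySem.Str.startswith ab.2 ab.1)))) = false ↔ _
  rw [PySem.List.slice_from_one]
  simp only [Bool.not_eq_false', List.any_eq_true, Bool.and_eq_true, decide_eq_true_eq,
    Bool.not_eq_true', beq_eq_false_iff_ne, ne_eq,
    PySem.Str.startswith, PySem.Chars.startswith, List.isPrefixOf_iff_prefix,
    PySem.Str.len_eq]
  constructor
  · rintro ⟨ab, hm, hne, hlt, hpre⟩
    exact ⟨ab, hm, hne, hpre, by exact_mod_cast hlt⟩
  · rintro ⟨ab, hm, hne, hpre, hlt⟩
    exact ⟨ab, hm, hne, by exact_mod_cast hlt, hpre⟩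

-- ---- order lemmas relating prefixes to the lexicographic order ----

theorem pvLex_append_cons (p : List Char) (c : Char) (r : List Char) :
    List.Lex (· < ·) p (p ++ c :: r) := by
  induction p with
  | nil => exact List.Lex.nil
  | cons a t ih => exact List.Lex.cons ih

theorem pvLex_of_proper_prefix {p s : List Char} (hpre : p <+: s)
    (hlt : p.length < s.length) : List.Lex (· < ·) p s := by
  obtain ⟨r, rfl⟩ := hpre
  match r with
  | [] => simp at hlt
  | c :: r' => exact pvLex_append_cons p c r'

theorem pvPrefix_of_between (p : List Char) :
    ∀ t s : List Char, ¬ List.Lex (· < ·) t p → ¬ List.Lex (· < ·) s t →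
      p <+: s → p <+: t := by
  induction p with
  | nil => intro t s _ _ _; exact List.nil_prefix
  | cons c p' ih =>
      intro t s hpt hts hps
      obtain ⟨r, rfl⟩ := hps
      match t with
      | [] => exact absurd List.Lex.nil hpt
      | d :: t' =>
          rcases lt_trichotomy c d with h | h | h
          · exact absurd (List.Lex.rel h) hts
          · subst h
            have h1 : ¬ List.Lex (· < ·) t' p' := fun hl => hpt (List.Lex.cons hl)
            have h2 : ¬ List.Lex (· < ·) (p' ++ r) t' := fun hl => hts (List.Lex.cons hl)
            have := ih t' (p' ++ r) h1 h2 (List.prefix_append _ _)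
            exact List.cons_prefix_cons.mpr ⟨rfl, this⟩
          · exact absurd (List.Lex.rel h) hpt

theorem pvStr_not_lex {a b : String} (h : a ≤ b) : ¬ List.Lex (· < ·) b.toList a.toList := by
  intro hl
  exact (Std.not_lt.mpr h) (String.lt_iff_toList_lt.mpr ((List.lt_iff_lex_lt _ _).mpr hl))

theorem pvZip_tail_sub (a : String) (L : List String) (ab : String × String)
    (h : ab ∈ L.zip L.tail) : ab ∈ (a :: L).zip L := by
  match L with
  | [] => simp at h
  | b :: L'' =>
      rw [List.zip_cons_cons]
      exact List.mem_cons_of_mem _ h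

theorem pvExists_adjacent (L : List String) (hP : L.Pairwise (· ≤ ·)) :
    ∀ p s : String, p ∈ L → s ∈ L → p ≠ "" → p.toList <+: s.toList →
      p.toList.length < s.toList.length →
      ∃ ab ∈ L.zip L.tail, ab.1 ≠ "" ∧ ab.1.toList <+: ab.2.toList ∧
        ab.1.toList.length < ab.2.toList.length := by
  induction L with
  | nil => intro p s hp; simp at hp
  | cons a L' ih =>
      obtain ⟨ha, hL'⟩ := List.pairwise_cons.mp hP
      intro p s hp hs hne hpre hlen
      rcases List.mem_cons.mp hs with rfl | hs'
      · -- s = a : impossible, a proper prefix of the head would be smaller than the head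
        rcases List.mem_cons.mp hp with rfl | hp'
        · omega
        · exact absurd (pvLex_of_proper_prefix hpre hlen) (pvStr_not_lex (ha p hp'))
      · rcases List.mem_cons.mp hp with rfl | hp'
        · -- p = a, the head; look at the next element b
          match L', hs', hL' with
          | b :: L'', hs', hL' =>
              have hab : p ≤ b := ha b (List.mem_cons_self)
              have hbs : b ≤ s := by
                rcases List.mem_cons.mp hs' with rfl | h
                · exact le_rfl
                · exact (List.pairwise_cons.mp hL').1 s h
              have hpb : p.toList <+: b.toList :=
                pvPrefix_of_between p.toList b.toList s.toList
                  (pvStr_not_lex hab) (pvStr_not_lex hbs) hpre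
              by_cases hlen2 : p.toList.length < b.toList.length
              · refine ⟨(p, b), ?_, hne, hpb, hlen2⟩
                rw [List.tail_cons, List.zip_cons_cons]
                exact List.mem_cons_self
              · -- p = b: recurse into the tail with b in p's place
                have hEq : p = b := by
                  apply String.toList_inj.mp
                  have h1 := List.prefix_iff_eq_take.mp hpb
                  have h2 : p.toList.length = b.toList.length :=
                    Nat.le_antisymm hpb.length_le (by omega)
                  rw [h1, h2, List.take_length]
                obtain ⟨ab, hm, hq⟩ :=
                  ih hL' b s (List.mem_cons_self) hs' (hEq ▸ hne) (hEq ▸ hpre) (hEq ▸ hlen)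
                exact ⟨ab, pvZip_tail_sub p _ ab hm, hq⟩
        · -- both p and s are in the tail
          obtain ⟨ab, hm, hq⟩ := ih hL' p s hp' hs' hne hpre hlen
          exact ⟨ab, pvZip_tail_sub a _ ab hm, hq⟩

theorem pvAlt_false_iff_bad (book : List String) :
    solution_alt book = false ↔ pvBad book := by
  rw [pvAlt_false_iff]
  constructor
  · rintro ⟨ab, hm, hne, hp, hl⟩
    have h1 : ab.1 ∈ PySem.List.sorted book (fun x => x) false := (List.of_mem_zip hm).1
    have h2 : ab.2 ∈ PySem.List.sorted book (fun x => x) false :=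
      List.mem_of_mem_tail (List.of_mem_zip hm).2
    rw [PySem.List.mem_sorted] at h1 h2
    exact ⟨ab.1, ab.2, h1, h2, fun hnil => hne (String.toList_eq_nil_iff.mp hnil), hp, hl⟩
  · rintro ⟨p, s, hp, hs, hne, hpre', hlt⟩
    obtain ⟨ab, hm, hq⟩ :=
      pvExists_adjacent _ (PySem.List.sorted_pairwise book (fun x => x)) p s
        ((PySem.List.mem_sorted _ _ _ _).mpr hp) ((PySem.List.mem_sorted _ _ _ _).mpr hs)
        (by intro h; exact hne (by rw [h]; rfl)) hpre' hlt
    exact ⟨ab, hm, hq⟩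

-- ===== VERDICT (by name: the statement is the Claim_ definition above) =====
theorem solution_spec : Claim_equal_solution := by
  intro book _
  show solution book = solution_alt book
  have hA := solution_false_iff book
  have hB := pvAlt_false_iff_bad book
  cases ha : solution book <;> cases hb : solution_alt book
  · rfl
  · exact absurd (hB.mpr (hA.mp ha)) (by rw [hb]; simp)
  · exact absurd (hA.mpr (hB.mp hb)) (by rw [ha]; simp)
  · rfl
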